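/- GENERATED by mk_final_copies.py from the proof of the farm's unit `start_decoder.F7` (farm:start_decoder.F7.2: Lemmas.lean) as the
   re-elaboration sweep compiled it — do not edit. -/
import Asan.CheckWalk
import Vorbis.Spec.Units.start_decoder_F7

namespace Vorbis.Spec.start_decoder_F7
open X86 X86.User Asan Vorbis Vorbis.Spec Vorbis.Spec.StartDecoder

/-- **Where the decoder object `*f = &p` is**: it is a stack object of a CALLER's protected frame (at or above `RA + 8`), or an object
off the stack region. So no store into start_decoder's own frame, nor a callee's push, meets it. -/
theorem obj_where {u₀ : State} {g : Ghost} {pc : Word} {A : Arena × List Obj} {v : State}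
    (hfr : Frame u₀ g pc A v) (hhand : g.Hand A) :
    g.RA + 8 ≤ g.f ∨ g.f + 1808 ≤ 0x700000 ∨ 0x800000 ≤ g.f := by
  obtain ⟨o, ho, k1, k2⟩ := hhand.obj
  simp only [voff] at k2
  rcases List.mem_append.mp ho with hs | hoth
  · left
    unfold stackObjs at hs
    obtain ⟨bF, hbF, hin⟩ := List.mem_flatMap.mp hs
    have hmem : bF ∈ g.frames' := List.mem_cons_of_mem _ hbF
    obtain ⟨a1, a8, _, _, _⟩ := hfr.shadow.stack.active bF hmem
    have hg := FrameLayout.objsAt_gran a1 a8 hin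
    have hc := hfr.callers bF hbF
    have hra := hfr.ra.1
    have e : o.gLo = o.base / 8 := rfl
    omega
  · right
    have hoff := hfr.shadow.off o hoth
    unfold OffStack at hoff
    omega

/-- **Where the floor element under construction is**: inside the block of FL2, an arena block allocated since the snapshot `A5` — so
inside the arena's buffer (above the image's text), off the stack region, in the data space. -/
theorem elem_where {g : Ghost} {A5 : Arena} {A : Arena × List Obj} {mem : Mem} {i : Nat}
    (harena : ArenaOK A.1 A.2 mem g.f) (hhand : g.Hand A) (hsh : FloorShape (Since A5 A.1) mem g.f)
    (hlt : (i : Int) < stb_vorbis.floor_count mem g.f) :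
    0x119d40 ≤ stb_vorbis.floor_config_at mem g.f i ∧
    (floorBlock mem g.f).base ≤ stb_vorbis.floor_config_at mem g.f i ∧
    stb_vorbis.floor_config_at mem g.f i + 1596 ≤ (floorBlock mem g.f).base + (floorBlock mem g.f).size ∧
    A.1.B ≤ (floorBlock mem g.f).base ∧
    (floorBlock mem g.f).base + (floorBlock mem g.f).size ≤ A.1.B + A.1.L ∧
    ((floorBlock mem g.f).base + (floorBlock mem g.f).size ≤ 0x700000 ∨ 0x800000 ≤ (floorBlock mem g.f).base) ∧
    (floorBlock mem g.f).base + (floorBlock mem g.f).size ≤ 0xC00000 := by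
  have hB : A.1.Blk (floorBlock mem g.f) := hsh.FL2.blk
  have hin := arena_inside harena hB
  have hoff := harena.blk_off_stack hB
  have hds := harena.blkOK.inside _ hB
  have hel := hsh.elem_in (IsFloor.of_lt hlt) (off := 0) (n := Off.sizeof.Floor) (Nat.le_refl _)
  have ht := hhand.arenaText
  have e : L.textHi = 0x119d40 := rfl
  simp only [Block.contains, Nat.add_zero, voff] at hel
  omega

/-- **A window that segment F7 may write** (`R` = the steady stack pointer, `G` = the floor element under construction): the stack below
`R` (the callee's frame, the pushed return addresses), the two spill slots `i` (`[R + 18H]`) and `longest_floorlist` (`[R + 28H]`),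
the frame objects `low` / `hi` (`[R + 80H, R + 94H)`), and the `neighbors` array of the element (`[G + 444H, G + 634H)`, the
entries `j ≥ 2`). -/
def Win (RA R G : Nat) (w : Span) : Prop :=
  (RA - 1888 ≤ w.lo ∧ w.hi ≤ R) ∨ (R + 0x18 ≤ w.lo ∧ w.hi ≤ R + 0x1c) ∨ (R + 0x28 ≤ w.lo ∧ w.hi ≤ R + 0x2c) ∨
    (R + 0x80 ≤ w.lo ∧ w.hi ≤ R + 0x94) ∨ (G + 0x444 ≤ w.lo ∧ w.hi ≤ G + 0x634)

/-- **A block that meets none of the windows of `Win`.** -/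
def OffWin (RA R G : Nat) (B : Block) : Prop :=
  (B.base + B.size ≤ RA - 1888 ∨ R + 0x94 ≤ B.base ∨ (R ≤ B.base ∧ B.base + B.size ≤ R + 0x18) ∨
      (R + 0x1c ≤ B.base ∧ B.base + B.size ≤ R + 0x28) ∨ (R + 0x2c ≤ B.base ∧ B.base + B.size ≤ R + 0x80)) ∧
    (B.base + B.size ≤ G + 0x444 ∨ G + 0x634 ≤ B.base)

/-- A block off the windows is kept by a batch of stores inside the windows. -/
theorem kept_of {RA R G : Nat} {ws : List Span} {m m' : Mem} (hR : R + 1480 = RA) (hs : Mem.SameExcept ws m m')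
    (hw : ∀ w, w ∈ ws → Win RA R G w) {B : Block} (hB : OffWin RA R G B) (hB2 : B.base + B.size ≤ 2 ^ 64) :
    B.Kept m m' := by
  apply Block.Kept.of_sameExcept hs ?_ hB2
  intro w hwm
  have h1 := hw w hwm
  unfold Win at h1
  unfold OffWin at hB
  omega

/-! ### The accessors of the element under construction, over the two kept parts `[G, G + 444H)` and `[G + 634H, G + 63CH)`

Everything but the `neighbors` entries `j ≥ 2` reads the same. -/

section Acc
variable {m m' : Mem} {G : Nat} (K1 : (Block.mk G 0x444).Kept m m') (K2 : (Block.mk (G + 0x634) 8).Kept m m')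
include K1

/-- `partitions` is kept. -/
theorem k_partitions : Floor1.partitions m' G = Floor1.partitions m G := by
  simp only [vacc, voff]
  exact K1.u8 _ (by simp only []; omega) (by simp only []; omega)

/-- `partition_class_list[j]` is kept. -/
theorem k_pcl (j : Nat) (hj : j < 32) : Floor1.partition_class_list m' G j = Floor1.partition_class_list m G j := by
  simp only [vacc, voff]
  exact K1.u8 _ (by simp only []; omega) (by simp only []; omega)

/-- `class_dimensions[c]` is kept. -/
theorem k_dims (c : Nat) (hc : c < 16) : Floor1.class_dimensions m' G c = Floor1.class_dimensions m G c := by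
  simp only [vacc, voff]
  exact K1.u8 _ (by simp only []; omega) (by simp only []; omega)

/-- `class_subclasses[c]` is kept. -/
theorem k_subs (c : Nat) (hc : c < 16) : Floor1.class_subclasses m' G c = Floor1.class_subclasses m G c := by
  simp only [vacc, voff]
  exact K1.u8 _ (by simp only []; omega) (by simp only []; omega)

/-- `class_masterbooks[c]` is kept. -/
theorem k_masters (c : Nat) (hc : c < 16) : Floor1.class_masterbooks m' G c = Floor1.class_masterbooks m G c := by
  simp only [vacc, voff]
  exact K1.u8 _ (by simp only []; omega) (by simp only []; omega)

/-- `subclass_books[c][k]` is kept. -/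
theorem k_books (c k : Nat) (hc : c < 16) (hk : k < 8) :
    Floor1.subclass_books m' G c k = Floor1.subclass_books m G c k := by
  simp only [vacc, voff]
  exact K1.i16 _ (by simp only []; omega) (by simp only []; omega)

/-- `Xlist[j]` is kept. -/
theorem k_xlist (j : Nat) (hj : j < 250) : Floor1.Xlist m' G j = Floor1.Xlist m G j := by
  simp only [vacc, voff]
  exact K1.u16 _ (by simp only []; omega) (by simp only []; omega)

/-- `sorted_order[q]` is kept. -/
theorem k_sorted (q : Nat) (hq : q < 250) : Floor1.sorted_order m' G q = Floor1.sorted_order m G q := by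
  simp only [vacc, voff]
  exact K1.u8 _ (by simp only []; omega) (by simp only []; omega)

/-- `neighbors[j][k]`, `j < 2`, is kept. -/
theorem k_nb01 (j k : Nat) (hj : j < 2) (hk : k < 2) : Floor1.neighbors m' G j k = Floor1.neighbors m G j k := by
  simp only [vacc, voff]
  exact K1.u8 _ (by simp only []; omega) (by simp only []; omega)

omit K1
include K2

/-- `floor1_multiplier` is kept. -/
theorem k_mult : Floor1.floor1_multiplier m' G = Floor1.floor1_multiplier m G := by
  simp only [vacc, voff]
  exact K2.u8 _ (by simp only []; omega) (by simp only []; omega)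

/-- `rangebits` is kept. -/
theorem k_rb : Floor1.rangebits m' G = Floor1.rangebits m G := by
  simp only [vacc, voff]
  exact K2.u8 _ (by simp only []; omega) (by simp only []; omega)

/-- `values` is kept. -/
theorem k_values : Floor1.values m' G = Floor1.values m G := by
  simp only [vacc, voff]
  exact K2.i32 _ (by simp only []; omega) (by simp only []; omega)

end Acc

/-- **`2 ≤ values ≤ 250`** for the floor under construction, from FL4, FL6, FL8 (`values_le_250`). -/
theorem values_bounds6 {g : Ghost} {m : Mem} {i n G : Nat} {mc : Int} (h : Floor6 g m i mc n) (hG : floorAt g m i = G) :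
    2 ≤ Floor1.values m G ∧ Floor1.values m G ≤ 250 := by
  obtain ⟨⟨⟨_, _, h4, _, _, hpcl⟩, hcl, hmc⟩, _, h8, _⟩ := h
  rw [hG] at h4 hpcl hcl h8
  have h6 := hcl.FL6 hpcl (Nat.le_refl _) hmc
  have hb := values_le_250 (fun j => Floor1.class_dimensions m G (Floor1.partition_class_list m G j))
    (Floor1.partitions m G) h4 (fun j hj => (h6 j hj).dim.2)
  unfold Floor1.dimSum at h8
  omega

/-- **FL4 … FL10 of the new floor in the memory `m'` at the end of the iteration**: the transients of the earlier loops hold in the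
memory `m` at the segment's entry and read fields that the segment does not write (`K1`, `K2`); FL10 is the exit of loop 4026. -/
theorem floor_done {g : Ghost} {m m' : Mem} {i n G nn : Nat} {mc cbc : Int} (h : Floor6 g m i mc n) (hG : floorAt g m i = G)
    (hcbc : stb_vorbis.codebook_count m g.f = cbc)
    (hso : SortedUpTo m G (Floor1.values m G).toNat)
    (K1 : (Block.mk G 0x444).Kept m m') (K2 : (Block.mk (G + 0x634) 8).Kept m m')
    (hnb : NbUpTo m' G nn) (hnn : Floor1.values m G ≤ (nn : Int)) : Floor1OK m' G cbc := by
  have hvb := values_bounds6 h hG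
  obtain ⟨⟨⟨_, _, h4, _, hmchi, hpcl⟩, hcl, hmc⟩, h7, h8, _⟩ := h
  rw [hG] at h4 hpcl hcl h8 h7
  rw [hcbc] at hcl
  have ep := k_partitions K1
  have ev := k_values K2
  have hpclk : ∀ j : Nat, j < Floor1.partitions m G →
      Floor1.partition_class_list m' G j = Floor1.partition_class_list m G j :=
    fun j hj => k_pcl K1 j (by omega)
  apply Floor1OK.of_transients (p := Floor1.partitions m G) (n := min n 16) (ns := (Floor1.values m G).toNat) (nn := nn)
    (mc := mc)
  · rw [ep]
    exact h4
  · exact hpcl.of_eq hpclk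
  · rw [ep]
    exact Nat.le_refl _
  · have hcl' : ClassesUpTo m G cbc (min n 16) := fun c hc => hcl c (by omega)
    apply hcl'.of_eq
    · intro c hc
      exact k_dims K1 c (by omega)
    · intro c hc
      exact k_subs K1 c (by omega)
    · intro c hc
      exact k_masters K1 c (by omega)
    · intro c k hc hk
      exact k_books K1 c k (by omega) hk
  · omega
  · rw [k_mult K2]
    exact h7
  · rw [ev, ep, h8]
    congr 2
    symm
    apply Floor1.dimSum_congr
    · exact hpclk
    · intro j hj
      exact k_dims K1 _ (by have := (hpcl j hj).1; omega)
  · exact hso.of_eq ev (fun q hq => k_sorted K1 q (by omega))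
  · rw [ev]
    omega
  · exact hnb
  · rw [ev]
    exact hnn

/-- **What segment F7 keeps of its entry assertion** in a memory `m'` that differs from the entry memory `m` only inside the windows
`Win` and not in the shadow: the kept blocks from which every memory-dependent field of the exit assertion is rebuilt. -/
structure Keep (u₀ : State) (g : Ghost) (i : Nat) (A5 : Arena) (A : Arena × List Obj) (G : Nat) (m m' : Mem) : Prop where
  /-- the element under construction, below the `neighbors` entries `j ≥ 2` -/
  K1 : (Block.mk G 0x444).Kept m m'
  /-- the element under construction, above the `neighbors` array -/
  K2 : (Block.mk (G + 0x634) 8).Kept m m'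
  /-- the decoder object -/
  KF : (objBlock g.f).Kept m m'
  /-- the spill slots `[R + 8, R + 18H)` -/
  KS1 : (Block.mk (g.R + 8) 0x10).Kept m m'
  /-- the spill slots `[R + 1CH, R + 28H)` -/
  KS2 : (Block.mk (g.R + 0x1c) 0xc).Kept m m'
  /-- the saved registers and the return address -/
  KS3 : (Block.mk (g.R + 0x598) 0x38).Kept m m'
  /-- the blocks of the configuration arena -/
  KA : ∀ B, A5.Blk B → B.Kept m m'
  /-- the finished floor elements -/
  KE : ∀ i' : Nat, i' < i → (Block.mk (stb_vorbis.floor_config_at m g.f i') Off.sizeof.Floor).Kept m m'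
  /-- the global `log2_4` -/
  KL : (Block.mk 0x120640 16).Kept m m'
  /-- the image's text -/
  code : CodeOK u₀ m'
  /-- the function's footprint -/
  same : Mem.SameExcept (footprint g) g.e.mem m'

/-- **The kept blocks of segment F7**, from the entry assertion, the walker's footprint `hs` and the windows' shape `hw`. -/
theorem keep_of {u₀ : State} {g : Ghost} {i : Nat} {A5 : Arena} {A : Arena × List Obj} {mc : Int} {n : Nat} {v : State}
    (hb : BodyF7 u₀ g i A5 A mc n v) {G : Nat} (hG : floorAt g v.mem i = G) {ws : List Span} {m' : Mem}
    (hs : Mem.SameExcept ws v.mem m') (hw : ∀ w, w ∈ ws → Win g.RA g.R G w) : Keep u₀ g i A5 A G v.mem m' := by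
  obtain ⟨hloop, _, hcur, _⟩ := hb
  obtain ⟨hfr, hhand, hmid, _, _, hile, hfloors, _⟩ := hloop
  have hlt := hcur.base.base.lt
  have hGw := elem_where hmid.arena hhand hfloors.toFloorShape hlt
  have hG' : stb_vorbis.floor_config_at v.mem g.f i = G := hG
  rw [hG'] at hGw
  obtain ⟨gw1, gw2, gw3, gw4, gw5, gw6, gw7⟩ := hGw
  obtain ⟨hR, hR8⟩ := hfr.r_eq
  obtain ⟨hra8, hra1, hra2⟩ := hfr.ra
  simp only [steady] at hR
  simp only [depth] at hra1
  have hf := obj_where hfr hhand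
  have hout := hhand.objOut
  have hobr := hmid.bits.OBR
  simp only [voff] at hout hobr
  have hC : Since A5 A.1 (floorBlock v.mem g.f) := hfloors.FL2
  refine ⟨?_, ?_, ?_, ?_, ?_, ?_, ?_, ?_, ?_, ?_, ?_⟩
  · apply kept_of hR hs hw
    · unfold OffWin
      simp only []
      omega
    · simp only []
      omega
  · apply kept_of hR hs hw
    · unfold OffWin
      simp only []
      omega
    · simp only []
      omega
  · apply kept_of hR hs hw
    · unfold OffWin
      simp only [vblock, voff]
      omega
    · simp only [vblock, voff]
      omega
  · apply kept_of hR hs hw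
    · unfold OffWin
      simp only []
      omega
    · simp only []
      omega
  · apply kept_of hR hs hw
    · unfold OffWin
      simp only []
      omega
    · simp only []
      omega
  · apply kept_of hR hs hw
    · unfold OffWin
      simp only []
      omega
    · simp only []
      omega
  · intro B hB
    have hBA : A.1.Blk B := hB.mono hmid.extc
    have hoff := hmid.arena.blk_off_stack hBA
    have hd := hmid.arena.old_disjoint_since hmid.extc hB hC
    have hin := hmid.arena.blkOK.inside _ hBA
    simp only [vblock] at hd
    apply kept_of hR hs hw
    · unfold OffWin
      omega
    · omega
  · intro i' hi'
    have hlt' : (i' : Int) < stb_vorbis.floor_count v.mem g.f := by omega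
    have hw' := elem_where hmid.arena hhand hfloors.toFloorShape hlt'
    obtain ⟨_, e2, e3, _, _, _, _⟩ := hw'
    have hG'' := hG'
    simp only [stb_vorbis.floor_config_at, voff] at hG'' e2 e3 ⊢
    apply kept_of hR hs hw
    · unfold OffWin
      simp only []
      omega
    · simp only []
      omega
  · have ho := hhand.outside ⟨0x120640, 16⟩ (by
      simp only [fixedBlocks, globalBlocks, List.mem_cons, true_or, or_true])
    simp only [] at ho
    apply kept_of hR hs hw
    · unfold OffWin
      simp only []
      omega
    · simp only []
      omega
  · have hc : Mem.EqOn L.textLo L.textHi u₀.mem v.mem := hfr.code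
    have e1 : L.textHi = 0x119d40 := rfl
    apply hc.trans
    apply hs.eqOn
    intro w hwm
    have := hw w hwm
    unfold Win at this
    omega
  · apply hfr.same.step_same hs
    intro w hwm a ha1 ha2
    have hwin := hw w hwm
    unfold Win at hwin
    have eB := hfr.ext.B
    have eL := hfr.ext.L
    by_cases hst : g.RA - 1888 ≤ a ∧ a < g.RA
    · refine ⟨⟨g.RA - depth, g.RA⟩, List.mem_cons_self, ?_, ?_⟩
      · simp only [depth]
        omega
      · simp only []
        omega
    · refine ⟨⟨g.A0.1.B, g.A0.1.B + g.A0.1.L⟩, ?_, ?_, ?_⟩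
      · simp only [footprint, writes, List.mem_cons, true_or, or_true]
      · simp only []
        omega
      · simp only []
        omega

/-- **The exit assertion `BodyF2` for `i + 1`** (the head of loop 3966) from the entry assertion, the kept blocks, the exit of loop
4026 (`hnb`: FL10), and the final state's registers and two spill slots (`[R + 18H] = i + 1`; `[R + 28H]` = the new
`longest_floorlist`: at least the old one and `values`, at most 250). -/
theorem exit_body {u₀ : State} {g : Ghost} {i : Nat} {A5 : Arena} {A : Arena × List Obj} {mc : Int} {n : Nat} {v w : State}
    (hb : BodyF7 u₀ g i A5 A mc n v) {G : Nat} (hG : floorAt g v.mem i = G)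
    (hk : Keep u₀ g i A5 A G v.mem w.mem) (hun : ShadowUntouched v.mem w.mem)
    {nn : Nat} (hnb : NbUpTo w.mem G nn) (hnn : Floor1.values v.mem G ≤ (nn : Int))
    (hrip : w.rip = pc_F2) (hrsp : w.reg .rsp = addr g.R) (hrbp : w.reg .rbp = addr g.f) (hinv : abiInv w)
    (hcnt : w.mem.u32 (g.R + 0x18) = i + 1)
    (hL1 : v.mem.i32 (g.R + 0x28) ≤ w.mem.i32 (g.R + 0x28))
    (hL2 : Floor1.values v.mem G ≤ w.mem.i32 (g.R + 0x28))
    (hL3 : w.mem.i32 (g.R + 0x28) ≤ 250) : BodyF2 u₀ g (i + 1) A5 A w := by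
  have hvb := values_bounds6 hb.cur hG
  obtain ⟨hloop, _, hcur, hsorted⟩ := hb
  obtain ⟨hfr, hhand, hmid, _, _, hile, hfloors, hlfl⟩ := hloop
  have hlt := hcur.base.base.lt
  have h3 := hcur.base.base.FL3
  have hG' : stb_vorbis.floor_config_at v.mem g.f i = G := hG
  rw [hG] at hsorted
  have hobr := hmid.bits.OBR
  have hi64 := hfloors.FL1.2
  simp only [voff] at hobr
  obtain ⟨hR, hR8⟩ := hfr.r_eq
  obtain ⟨hra8, hra1, hra2⟩ := hfr.ra
  simp only [steady] at hR
  simp only [depth] at hra1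
  -- the fields of `*f` that the floor clauses read
  have hfc : stb_vorbis.floor_count w.mem g.f = stb_vorbis.floor_count v.mem g.f := by
    simp only [vacc, voff]
    exact hk.KF.i32 _ (by simp only [vblock]; omega) (by simp only [vblock, voff]; omega)
  have hcfg : stb_vorbis.floor_config w.mem g.f = stb_vorbis.floor_config v.mem g.f := by
    simp only [vacc, voff]
    exact hk.KF.u64 _ (by simp only [vblock]; omega) (by simp only [vblock, voff]; omega)
  have hcc : stb_vorbis.codebook_count w.mem g.f = stb_vorbis.codebook_count v.mem g.f := by
    simp only [vacc, voff]
    exact hk.KF.i32 _ (by simp only [vblock]; omega) (by simp only [vblock, voff]; omega)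
  have hft : ∀ i' : Nat, i' ≤ i → stb_vorbis.floor_types w.mem g.f i' = stb_vorbis.floor_types v.mem g.f i' := by
    intro i' hi'
    simp only [vacc, voff]
    exact hk.KF.u16 _ (by simp only [vblock]; omega) (by simp only [vblock, voff]; omega)
  have hGw : stb_vorbis.floor_config_at w.mem g.f i = G := by
    rw [← hG']
    simp only [stb_vorbis.floor_config_at]
    rw [hcfg]
  have he : ObjEq (Mid.winsAt 5 6) v.mem g.f w.mem g.f := ObjEq.of_kept_obj hk.KF (by decide)
  have hos : ObjSame g.f v.mem w.mem := ObjEq.of_kept_obj hk.KF (by decide)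
  refine ⟨⟨hfr.entry, hrip, hrsp, ?_, ?_, ?_, ?_, ?_, ?_, ?_, ?_, hk.code, hinv, hfr.shadow.untouched hun, hfr.offText, hfr.ext,
    hfr.callers, ?_, hk.same⟩, hhand, ?_, hrbp, hcnt, ?_, ?_, ?_⟩
  · rw [hk.KS1.u64 _ (by simp only []; omega) (by simp only []; omega)]
    exact hfr.shadowIdx
  · rw [hk.KS3.u64 _ (by simp only []; omega) (by simp only []; omega)]
    exact hfr.saved_rbx
  · rw [hk.KS3.u64 _ (by simp only []; omega) (by simp only []; omega)]
    exact hfr.saved_rbp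
  · rw [hk.KS3.u64 _ (by simp only []; omega) (by simp only []; omega)]
    exact hfr.saved_r12
  · rw [hk.KS3.u64 _ (by simp only []; omega) (by simp only []; omega)]
    exact hfr.saved_r13
  · rw [hk.KS3.u64 _ (by simp only []; omega) (by simp only []; omega)]
    exact hfr.saved_r14
  · rw [hk.KS3.u64 _ (by simp only []; omega) (by simp only []; omega)]
    exact hfr.saved_r15
  · rw [hk.KS3.u64 _ (by simp only []; omega) (by simp only []; omega)]
    exact hfr.saved_ra
  · -- SH7 for `log2_4`
    intro k hk16
    have e := hk.KL.u8 (0x120640 + k) (by simp only []; omega) (by simp only []; omega)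
    have h0 := hfr.sh7 k hk16
    exact e.trans h0
  · -- the invariant inside the section
    apply hmid.frame he hk.KA ?_ (fun h6 _ => absurd h6 (by omega)) hun
      (hmid.arena.frame_obj (by simp only [voff]; omega) hk.KF.same) (hmid.bits.frame hos)
    obtain ⟨c1, c2, c3, c4, c5⟩ := hmid.consts
    refine ⟨c1, ?_, ?_, ?_, ?_⟩
    · rw [hk.KS1.u64 _ (by simp only []; omega) (by simp only []; omega)]
      exact c2
    · rw [hk.KS2.u32 _ (by simp only []; omega) (by simp only []; omega)]
      exact c3
    · intro h7
      rw [hk.KS1.u8 _ (by simp only []; omega) (by simp only []; omega)]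
      exact c4 h7
    · intro h2 h11
      rw [hk.KS2.u32 _ (by simp only []; omega) (by simp only []; omega)]
      exact c5 h2 h11
  · rw [hfc]
    omega
  · -- FL1 … FL10 of the floors below `i + 1`
    have hfl := hfloors.frame hfc hcfg hcc (fun i' hi' => hft i' (by omega)) hk.KE
    apply hfl.step
    · rw [hft i (Nat.le_refl _)]
      exact h3
    · rw [hGw]
      exact floor_done hcur hG hcc.symm hsorted hk.K1 hk.K2 hnb hnn
  · -- the slot of `longest_floorlist`
    have hge := hlfl.ge.of_eq hcfg (fun i' hi' => by
      have hkk := hk.KE i' hi'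
      simp only [vacc, voff] at hkk ⊢
      exact hkk.i32 _ (by simp only []; omega) (by simp only []; omega))
    have hlo := hlfl.lo
    refine ⟨?_, by omega, hL3, fun _ => by omega⟩
    apply LongestOK.step (L := v.mem.i32 (g.R + 0x28)) hge hL1
    rw [hGw, k_values hk.K2]
    exact hL2

/-- **FL10 so far is kept by stores off the element** (the two spill stores of the exit path, the callee's frame). -/
theorem nb_off {m m' : Mem} {G j : Nat} {ws : List Span} (hs : Mem.SameExcept ws m m')
    (hd : ∀ w, w ∈ ws → G + 1596 ≤ w.lo ∨ w.hi ≤ G) (hG : G + 1596 ≤ 2 ^ 64) (h : NbUpTo m G j) (hj : j ≤ 250) :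
    NbUpTo m' G j := by
  have hsm : (Block.mk G Off.sizeof.Floor).Same m m' := Block.Same.of_sameExcept hs (by
    intro w hw
    have := hd w hw
    simp only [voff]
    omega)
  have hg : G + Off.sizeof.Floor ≤ 2 ^ 64 := by
    simp only [voff]
    omega
  apply h.of_eq
  · intro j' k hj' hk
    exact Floor1.same_neighbors hsm hg j' k (by omega) hk
  · intro i' hi'
    exact Floor1.same_Xlist hsm hg i' (by omega)

/-- The value of a 32-bit store of a small number, read back. -/
theorem ofNat32_toNat (x : Nat) (hx : x < 2 ^ 32) : (BitVec.ofNat 32 x).toNat = x := by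
  rw [BitVec.toNat_ofNat]
  exact Nat.mod_eq_of_lt hx

/-- `++i` in 32 bits, for a small counter. -/
theorem ofNat32_succ_toNat (x : Nat) (hx : x < 1000) : (BitVec.ofNat 32 x + 1#32).toNat = x + 1 := by
  rw [BitVec.toNat_add, BitVec.toNat_ofNat]
  have e : (1#32).toNat = 1 := rfl
  rw [e]
  omega

/-- The signed value of a small 32-bit number. -/
theorem ofNat32_toInt (x : Nat) (hx : x < 1000) : (BitVec.ofNat 32 x).toInt = (x : Int) := by
  rw [toInt_ofNat32 x (by omega)]
  have hc := sint32_cases x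
  omega

/-- **`low` is a live object** inside start_decoder: the 4-byte object at `[R + 80H]` of the own protected frame. -/
theorem low_live (g : Ghost) (others : List Obj) : LiveIn others g.frames' (g.R + 0x80) 4 := by
  refine ⟨⟨g.base + 48, 4, .stack⟩, ?_, ?_, ?_⟩
  · apply List.mem_append_left
    unfold Ghost.frames'
    rw [stackObjs_cons]
    apply List.mem_append_left
    unfold FrameLayout.objsAt
    refine List.mem_map.mpr ⟨⟨"low", 48, 4⟩, ?_, rfl⟩
    simp only [Vorbis.Frames.start_decoder, List.mem_cons, true_or]
  · unfold Ghost.base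
    simp only []
    omega
  · unfold Ghost.base
    simp only []
    omega

/-- **`hi` is a live object** inside start_decoder: the 4-byte object at `[R + 90H]` of the own protected frame. -/
theorem hi_live (g : Ghost) (others : List Obj) : LiveIn others g.frames' (g.R + 0x90) 4 := by
  refine ⟨⟨g.base + 64, 4, .stack⟩, ?_, ?_, ?_⟩
  · apply List.mem_append_left
    unfold Ghost.frames'
    rw [stackObjs_cons]
    apply List.mem_append_left
    unfold FrameLayout.objsAt
    refine List.mem_map.mpr ⟨⟨"hi", 64, 4⟩, ?_, rfl⟩
    simp only [Vorbis.Frames.start_decoder, List.mem_cons, true_or, or_true]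
  · unfold Ghost.base
    simp only []
    omega
  · unfold Ghost.base
    simp only []
    omega

/-- **The floor block is a live object** (AR6), for the live list inside start_decoder. -/
theorem floor_live {g : Ghost} {A5 : Arena} {A : Arena × List Obj} {mem : Mem}
    (harena : ArenaOK A.1 A.2 mem g.f) (hsh : FloorShape (Since A5 A.1) mem g.f) :
    LiveIn A.2 g.frames' (floorBlock mem g.f).base (floorBlock mem g.f).size :=
  liveIn_of_arenaBlk harena hsh.FL2.blk

/-- `add r12d, 1` for a small counter. -/
theorem incr12d (j : Nat) (hj : j < 1000) : Word.ofBV (Word.part .w32 (UInt64.ofNat j) + 1#32) = UInt64.ofNat (j + 1) := by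
  apply UInt64.toNat_inj.mp
  have e1 : (UInt64.ofNat j).toNat = j := by
    rw [UInt64.toNat_ofNat']
    omega
  have e2 : (UInt64.ofNat (j + 1)).toNat = j + 1 := by
    rw [UInt64.toNat_ofNat']
    omega
  have e3 : (1#32).toNat = 1 := rfl
  rw [Vorbis.toNat_ofBV32, BitVec.toNat_add, Vorbis.toNat_part32, e1, e2, e3]
  omega

/-- **FL10 for the earlier `j` is kept by the stores of iteration `j`**: the stack, and bytes of the element from
`neighbors[j]` on. -/
theorem nb_young {m m' : Mem} {G j : Nat} {ws : List Span} (hs : Mem.SameExcept ws m m')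
    (hd : ∀ w, w ∈ ws → G + 1596 ≤ w.lo ∨ w.hi ≤ G ∨ (G + 1088 + 2 * j ≤ w.lo ∧ w.hi ≤ G + 1596))
    (hG : G + 1596 ≤ 2 ^ 64) (h : NbUpTo m G j) (hj : j ≤ 250) : NbUpTo m' G j := by
  have hk : (Block.mk G (1088 + 2 * j)).Kept m m' := by
    apply Block.Kept.of_sameExcept hs
    · intro w hw
      have := hd w hw
      simp only []
      omega
    · simp only []
      omega
  apply h.of_eq
  · intro j' k hj' hk'
    simp only [vacc, voff]
    exact hk.u8 _ (by simp only []; omega) (by simp only []; omega)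
  · intro i' hi'
    simp only [vacc, voff]
    exact hk.u16 _ (by simp only []; omega) (by simp only []; omega)

/-- **One iteration of loop 4026**: FL10 for `j` from the post of `neighbors` (stated over the callee's entry memory `me`, in which
`low = hi = 0`), XL, and the two bytes stored; `mf` = the memory at the back edge. -/
theorem nb_step {u₀ : State} {g : Ghost} {i : Nat} {A5 : Arena} {A : Arena × List Obj} {mc : Int} {n : Nat} {v : State}
    (hb : BodyF7 u₀ g i A5 A mc n v) {G : Nat} (hG : floorAt g v.mem i = G) {me mf : Mem}
    (Ke : Keep u₀ g i A5 A G v.mem me) (Kf : Keep u₀ g i A5 A G v.mem mf) {j low hi : Nat}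
    (h2 : 2 ≤ j) (hjV : (j : Int) < Floor1.values v.mem G)
    (hlow : (∃ i, i < j ∧ Floor1.Xlist me G i < Floor1.Xlist me G j) → low < j ∧ Floor1.Xlist me G low < Floor1.Xlist me G j)
    (hlow0 : ¬ (∃ i, i < j ∧ Floor1.Xlist me G i < Floor1.Xlist me G j) → low = 0)
    (hhi : (∃ i, i < j ∧ Floor1.Xlist me G j < Floor1.Xlist me G i) → hi < j ∧ Floor1.Xlist me G j < Floor1.Xlist me G hi)
    (hn0 : Floor1.neighbors mf G j 0 = low % 2 ^ 8) (hn1 : Floor1.neighbors mf G j 1 = hi % 2 ^ 8)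
    (hnbj : NbUpTo mf G j) : NbUpTo mf G (j + 1) := by
  have hvb := values_bounds6 hb.cur hG
  have hxl0 : XL v.mem G := by
    have := hb.cur.xl
    rw [hG] at this
    exact this
  have hxl : XLUpTo me G (Floor1.values v.mem G).toNat :=
    XLUpTo.of_eq hxl0 (by omega) (k_rb Ke.K2) (fun j' hj' => k_xlist Ke.K1 j' (by omega))
  apply hnbj.step
  apply NbOK.of_post hxl h2 (by omega) (by omega) hlow hlow0 hhi hn0 hn1
  intro i' hi'
  rw [k_xlist Kf.K1 i' (by omega), k_xlist Ke.K1 i' (by omega)]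

/-- **The post of `neighbors(g->Xlist, j, &low, &hi)` in the floor's vocabulary**: `se` = the callee's entry state (`rdi = g + 338`,
`esi = j`, `*plow = 0` there), `sr` = its return state (`*plow = low`, `*phigh = hi`): the three hypotheses of `NbOK.of_post`. -/
theorem post_conv {others : List Obj} {frames : List (Nat × FrameLayout)} {se sr : State} {G j low hi : Nat}
    (hjs : s32 (se.reg .rsi) = (j : Int)) (erdi : (se.reg .rdi).toNat = G + 338)
    (elow : sr.mem.u32 (se.reg .rdx).toNat = low) (ehi : sr.mem.u32 (se.reg .rcx).toNat = hi)
    (e0 : se.mem.u32 (se.reg .rdx).toNat = 0) (hpost : (neighbors.spec others frames).post se sr) :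
    ((∃ i, i < j ∧ Floor1.Xlist se.mem G i < Floor1.Xlist se.mem G j) →
        low < j ∧ Floor1.Xlist se.mem G low < Floor1.Xlist se.mem G j) ∧
      (¬ (∃ i, i < j ∧ Floor1.Xlist se.mem G i < Floor1.Xlist se.mem G j) → low = 0) ∧
      ((∃ i, i < j ∧ Floor1.Xlist se.mem G j < Floor1.Xlist se.mem G i) →
        hi < j ∧ Floor1.Xlist se.mem G j < Floor1.Xlist se.mem G hi) := by
  obtain ⟨_, hplow, hplow0, hphi, _⟩ := hpost
  rw [hjs, erdi, elow, Int.toNat_natCast] at hplow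
  rw [hjs, erdi, elow, e0, Int.toNat_natCast] at hplow0
  rw [hjs, erdi, ehi, Int.toNat_natCast] at hphi
  refine ⟨?_, ?_, ?_⟩
  · intro hex
    obtain ⟨i', hi', hx⟩ := hex
    simp only [vacc, voff] at hx ⊢
    have hp := hplow ⟨i', by omega, hx⟩
    obtain ⟨hp1, hp2⟩ := hp
    exact ⟨by omega, hp2⟩
  · intro hne
    apply hplow0
    intro hex
    apply hne
    obtain ⟨i', hi', hx⟩ := hex
    refine ⟨i', by omega, ?_⟩
    simp only [vacc, voff]
    exact hx
  · intro hex
    obtain ⟨i', hi', hx⟩ := hex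
    simp only [vacc, voff] at hx ⊢
    have hp := hphi ⟨i', by omega, hx⟩
    obtain ⟨hp1, hp2⟩ := hp
    exact ⟨by omega, hp2⟩

/-- The byte that `mov [m], r15b` stores of a 32-bit value. -/
theorem trunc8 (x : Nat) : (BitVec.setWidth 8 (BitVec.ofNat 32 x)).toNat = x % 2 ^ 8 := by
  rw [BitVec.toNat_setWidth, BitVec.toNat_ofNat]
  omega

end Vorbis.Spec.start_decoder_F7
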